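-- pv_equiv track=rewrite | github.com/hkk828/ProblemSolving | samsung/BeadEscape2/bead_escape2.py | tilt_left
-- ===== SOURCE A (Python) =====
-- def tilt_row_left(row):
--     tilted_row = row[:]
--
--     # 빨간구슬과 파란구슬의 index를 저장한다 (없으면 -1)
--     red = tilted_row.index('R') if 'R' in tilted_row else -1
--     blue = tilted_row.index('B') if 'B' in tilted_row else -1
--
--     # front에는 더 왼쪽에 있는 구슬의 index, back에는 나머지 구슬의 index를 저장한다
--     front = red if red < blue else blue
--     back = blue if red < blue else red
--
--     # 최대 (행의 길이 - 3) 번까지 구슬들을 왼쪽으로 움직여준다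
--     for _ in range(len(row)-3):
--         # 앞에 있는 구슬이 왼쪽으로 움직일 수 있는 가능성이 있는 경우만
--         if front in range(2, len(row)-1):
--             # 앞구슬 왼쪽에 구멍이 있으면 앞구슬을 뺀다
--             if tilted_row[front-1] == 'O':
--                 tilted_row[front] = '.'
--                 front = -1
--             # 앞구슬 왼쪽이 비어있으면 앞구슬을 왼쪽으로 한칸 전진시킨다
--             elif tilted_row[front-1] == '.':
--                 tilted_row[front-1], tilted_row[front] = tilted_row[front], tilted_row[front-1]
--                 front -= 1
--
--         # 뒤에 있는 구슬이 왼쪽으로 움직일 수 있는 가능성이 있는 경우만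
--         if back in range(2, len(row)-1):
--             # 뒷구슬 왼쪽에 구멍이 있으면 뒷구슬을 뺸다
--             if tilted_row[back-1] == 'O':
--                 tilted_row[back] = '.'
--                 back = -1
--             # 뒷구슬 왼쪽이 비어있으면 뒷구슬을 왼쪽으로 한칸 전진시킨다
--             elif tilted_row[back-1] == '.':
--                 tilted_row[back-1], tilted_row[back] = tilted_row[back], tilted_row[back-1]
--                 back -= 1
--
--     return tilted_row
--
-- def tilt_left(board):
--     tilted_board = []
--     for idx, row in enumerate(board):
--         # 첫 행과 마지막 행은 모두 막혀있다
--         if idx == 0 or idx == len(board)-1: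
--             tilted_board.append(['#'] * len(board[0]))
--             continue
--         # 혅재 행에 빨간구슬, 파란구슬 모두 없으면 현재 행을 복사한다
--         if 'R' not in row and 'B' not in row:
--             tilted_board.append(row.copy())
--             continue
--         # 현재 행에 빨간구슬 혹은 파란구슬이 하나라도 있으면, 현재행에 대해서 왼쪽으로 기울이기를 해준다슬이
--         tilted_board.append(tilt_row_left(row))
--     return tilted_board
-- ===== SOURCE B (Python) =====
-- def rest(row, j):
--     # final index of a bead currently at j, or None if it falls into a hole
--     m = len(row)
--     while 2 <= j <= m - 2:
--         c = row[j - 1]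
--         if c == 'O':
--             return None
--         if c != '.':
--             break
--         j -= 1
--     return j
--
-- def settle_row(row):
--     # place each bead (left bead first) directly at its computed resting cell
--     r = row.index('R') if 'R' in row else None
--     b = row.index('B') if 'B' in row else None
--     beads = sorted(i for i in (r, b) if i is not None)
--     new = row.copy()
--     for i in beads:
--         new[i] = '.'
--     for i in beads:
--         p = rest(new, i)
--         if p is not None:
--             new[p] = row[i]
--     return new
--
-- def tilt_left(board):
--     last = len(board) - 1
--     return [
--         ['#'] * len(board[0]) if idx == 0 or idx == last
--         else settle_row(row) if 'R' in row or 'B' in row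
--         else row.copy()
--         for idx, row in enumerate(board)
--     ]
-- ===== Notes on version B (the rewrite author's own statement) =====
-- stated objective: alternative
-- what changed: A shuffles each bead one cell per iteration of a fixed (row_length - 3)-round loop over mutable state; B computes each bead's final resting cell directly with a single leftward walk per bead (front bead first, then the back bead against the front's settled position) and writes the result once.
import Mathlib
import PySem

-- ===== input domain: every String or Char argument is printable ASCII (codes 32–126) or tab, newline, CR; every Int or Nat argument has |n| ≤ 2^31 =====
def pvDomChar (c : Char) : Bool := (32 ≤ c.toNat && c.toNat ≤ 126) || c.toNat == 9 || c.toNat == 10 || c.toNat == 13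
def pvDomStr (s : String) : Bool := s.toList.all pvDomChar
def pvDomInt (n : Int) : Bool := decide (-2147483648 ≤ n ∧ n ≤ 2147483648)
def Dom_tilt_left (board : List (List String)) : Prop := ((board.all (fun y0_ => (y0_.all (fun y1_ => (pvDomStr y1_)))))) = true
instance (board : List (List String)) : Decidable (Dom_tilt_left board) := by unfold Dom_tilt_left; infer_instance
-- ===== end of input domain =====

-- B replaces A's fixed-count cell-by-cell shuffle with a direct computation of each
-- bead's resting cell (one leftward walk per bead); same return value, different algorithm.

-- ===== PORT A =====
-- one bead's move: the loop-body block that A's Python writes out twice (front, then back)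
def tiltMove (n : Int) (ρ : List String) (j : Int) : List String × Int :=
  if 2 ≤ j ∧ j < n - 1 then
    match PySem.List.pyGet? ρ (j - 1) with
    | some c =>
        if c = "O" then (ρ.set j.toNat ".", -1)
        else if c = "." then
          ((ρ.set (j - 1).toNat (PySem.List.pyGetD ρ j "")).set j.toNat c, j - 1)
        else (ρ, j)
    | none => (ρ, j)           -- unreachable: the guard keeps j-1 inside the list
  else (ρ, j)

def tiltRowLeft (row : List String) : List String :=
  let red : Int := if row.contains "R" then (((PySem.List.index? row "R").getD 0 : Nat) : Int) else -1
  let blue : Int := if row.contains "B" then (((PySem.List.index? row "B").getD 0 : Nat) : Int) else -1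
  let front : Int := if red < blue then red else blue
  let back : Int := if red < blue then blue else red
  let fin :=
    (PySem.List.pyRange 0 ((row.length : Int) - 3) 1).foldl
      (fun st _ =>
        let s1 := tiltMove (row.length : Int) st.1 st.2.1
        let s2 := tiltMove (row.length : Int) s1.1 st.2.2
        (s2.1, (s1.2, s2.2)))
      (row, (front, back))
  fin.1

def tilt_left (board : List (List String)) : List (List String) :=
  (PySem.List.enumerate board 0).foldl
    (fun acc p =>
      if p.1 = 0 ∨ p.1 = (board.length : Int) - 1 then
        acc ++ [List.replicate (board.headD []).length "#"]
      else if ¬ p.2.contains "R" ∧ ¬ p.2.contains "B" then acc ++ [p.2]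
      else acc ++ [tiltRowLeft p.2])
    []

-- ===== PORT B =====
-- final index of a bead currently at j, or none if it falls into a hole (B's `rest`)
def restWalk (m : Int) (row : List String) (j : Int) : Option Int :=
  if h : 2 ≤ j ∧ j ≤ m - 2 then
    match PySem.List.pyGet? row (j - 1) with
    | some c => if c = "O" then none else if c = "." then restWalk m row (j - 1) else some j
    | none => some j           -- unreachable when m = row.length
  else some j
termination_by j.toNat
decreasing_by omega

def settleRow (row : List String) : List String :=
  let r : Option Nat := if row.contains "R" then PySem.List.index? row "R" else none
  let b : Option Nat := if row.contains "B" then PySem.List.index? row "B" else none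
  let beads : List Nat := PySem.List.sorted (([r, b] : List (Option Nat)).filterMap id) (fun i => i) false
  let cleared := beads.foldl (fun acc (i : Nat) => acc.set i ".") row
  beads.foldl
    (fun acc (i : Nat) =>
      match restWalk (acc.length : Int) acc (i : Int) with
      | some p => acc.set p.toNat (row.getD i "")
      | none => acc)
    cleared

def tilt_left_alt (board : List (List String)) : List (List String) :=
  (PySem.List.enumerate board 0).map
    (fun p =>
      if p.1 = 0 ∨ p.1 = (board.length : Int) - 1 then
        List.replicate (board.headD []).length "#"
      else if p.2.contains "R" ∨ p.2.contains "B" then settleRow p.2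
      else p.2)

-- ===== PRECONDITION & SPEC =====
def Spec_tilt_left (board : List (List String)) (out : List (List String)) : Prop := out = tilt_left_alt board
instance (board : List (List String)) (out : List (List String)) : Decidable (Spec_tilt_left board out) := by unfold Spec_tilt_left; infer_instance

-- ===== CLAIM (what is proved, stated in full; the proofs are below) =====
def Claim_equal_tilt_left : Prop := ∀ (board : List (List String)), Dom_tilt_left board → Spec_tilt_left board (tilt_left board)

-- ===== LEMMAS AND PROOFS =====

-- proof-side machinery: iteration counts, the closed form of one bead's loop, the
-- combined loop step, its closed form, and the loop invariant

def needed (m : Int) (ρ : List String) (j : Int) : Nat :=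
  if h : 2 ≤ j ∧ j ≤ m - 2 then
    match PySem.List.pyGet? ρ (j - 1) with
    | some c => if c = "O" then 1 else if c = "." then needed m ρ (j - 1) + 1 else 0
    | none => 0
  else 0
termination_by j.toNat
decreasing_by omega

def applyRest (n : Int) (ρ : List String) (j : Int) : List String × Int :=
  if j < 0 then (ρ, j)
  else
    match restWalk n ρ j with
    | none => (ρ.set j.toNat ".", -1)
    | some p => ((ρ.set j.toNat ".").set p.toNat (PySem.List.pyGetD ρ j ""), p)

def fullStepN (n : Int) (st : List String × Int × Int) : List String × Int × Int :=
  let s1 := tiltMove n st.1 st.2.1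
  let s2 := tiltMove n s1.1 st.2.2
  (s2.1, (s1.2, s2.2))

def G (n : Int) (st : List String × Int × Int) : List String × Int × Int :=
  let a1 := applyRest n st.1 st.2.1
  let a2 := applyRest n a1.1 st.2.2
  (a2.1, (a1.2, a2.2))

def BeadCell (ρ : List String) (f : Int) : Prop :=
  PySem.List.pyGetD ρ f "" ≠ "." ∧ PySem.List.pyGetD ρ f "" ≠ "O"

def BInv (n : Int) (ρ : List String) (f b : Int) : Prop :=
  n = ρ.length ∧
  (f = -1 ∨ (0 ≤ f ∧ f < n ∧ BeadCell ρ f)) ∧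
  (b = -1 ∨ (0 ≤ b ∧ b < n)) ∧
  (f ≠ -1 → b ≠ -1 → f < b)

theorem length_tiltMove (n : Int) (ρ : List String) (j : Int) :
    ((tiltMove n ρ j).1).length = ρ.length := by
  unfold tiltMove
  split
  · split
    · split_ifs <;> simp
    · rfl
  · rfl

theorem restWalk_le (m : Int) (ρ : List String) (j p : Int)
    (h : restWalk m ρ j = some p) : p ≤ j := by
  fun_induction restWalk m ρ j generalizing p with
  | case1 j hg hget => simp at h
  | case2 j hg hget hne ih => have := ih p h; omega
  | case3 j hg c hget hO hdot => simp at h; omega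
  | case4 j hg hget => simp at h; omega
  | case5 j hg => simp at h; omega

theorem restWalk_nonneg (m : Int) (ρ : List String) (j p : Int) (h0 : 0 ≤ j)
    (h : restWalk m ρ j = some p) : 0 ≤ p := by
  fun_induction restWalk m ρ j generalizing p with
  | case1 j hg hget => simp at h
  | case2 j hg hget hne ih => exact ih p (by omega) h
  | case3 j hg c hget hO hdot => simp at h; omega
  | case4 j hg hget => simp at h; omega
  | case5 j hg => simp at h; omega


theorem get_left_eq (ρ₁ ρ₂ : List String) (j : Int) (h2 : 2 ≤ j)
    (h : ∀ i : Nat, (i : Int) < j → ρ₁[i]? = ρ₂[i]?) :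
    PySem.List.pyGet? ρ₂ (j - 1) = PySem.List.pyGet? ρ₁ (j - 1) := by
  rw [PySem.List.pyGet?_of_nonneg ρ₁ (by omega), PySem.List.pyGet?_of_nonneg ρ₂ (by omega)]
  exact (h (j - 1).toNat (by omega)).symm

theorem restWalk_congr (m : Int) (ρ₁ : List String) (j : Int) :
    ∀ ρ₂ : List String, (∀ i : Nat, (i : Int) < j → ρ₁[i]? = ρ₂[i]?) →
    restWalk m ρ₁ j = restWalk m ρ₂ j := by
  fun_induction restWalk m ρ₁ j with
  | case1 j hg hget =>
      intro ρ₂ h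
      rw [restWalk, dif_pos hg, get_left_eq ρ₁ ρ₂ j hg.1 h, hget]
      simp
  | case2 j hg hget hne ih =>
      intro ρ₂ h
      rw [ih ρ₂ (fun i hi => h i (by omega))]
      conv_rhs => rw [restWalk]
      rw [dif_pos hg, get_left_eq ρ₁ ρ₂ j hg.1 h, hget]
      simp
  | case3 j hg c hget hO hdot =>
      intro ρ₂ h
      rw [restWalk, dif_pos hg, get_left_eq ρ₁ ρ₂ j hg.1 h, hget]
      simp [hO, hdot]
  | case4 j hg hget =>
      intro ρ₂ h
      rw [restWalk, dif_pos hg, get_left_eq ρ₁ ρ₂ j hg.1 h, hget]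
  | case5 j hg =>
      intro ρ₂ h
      rw [restWalk, dif_neg hg]

theorem needed_congr (m : Int) (ρ₁ : List String) (j : Int) :
    ∀ ρ₂ : List String, (∀ i : Nat, (i : Int) < j → ρ₁[i]? = ρ₂[i]?) →
    needed m ρ₁ j = needed m ρ₂ j := by
  fun_induction needed m ρ₁ j with
  | case1 j hg hget =>
      intro ρ₂ h
      rw [needed, dif_pos hg, get_left_eq ρ₁ ρ₂ j hg.1 h, hget]
      simp
  | case2 j hg hget hne ih =>
      intro ρ₂ h
      rw [ih ρ₂ (fun i hi => h i (by omega))]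
      conv_rhs => rw [needed]
      rw [dif_pos hg, get_left_eq ρ₁ ρ₂ j hg.1 h, hget]
      simp
  | case3 j hg c hget hO hdot =>
      intro ρ₂ h
      rw [needed, dif_pos hg, get_left_eq ρ₁ ρ₂ j hg.1 h, hget]
      simp [hO, hdot]
  | case4 j hg hget =>
      intro ρ₂ h
      rw [needed, dif_pos hg, get_left_eq ρ₁ ρ₂ j hg.1 h, hget]
  | case5 j hg =>
      intro ρ₂ h
      rw [needed, dif_neg hg]

theorem stuck_of_needed_zero (n : Int) (ρ : List String) (j : Int)
    (h : needed n ρ j = 0) : tiltMove n ρ j = (ρ, j) ∧ restWalk n ρ j = some j := by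
  rw [needed] at h
  rw [tiltMove, restWalk]
  by_cases hg : 2 ≤ j ∧ j ≤ n - 2
  · rw [dif_pos hg] at h
    rw [if_pos (by omega : 2 ≤ j ∧ j < n - 1), dif_pos hg]
    cases hget : PySem.List.pyGet? ρ (j - 1) with
    | none => simp [hget]
    | some c =>
        rw [hget] at h
        by_cases hO : c = "O"
        · simp [hO] at h
        · by_cases hdot : c = "."
          · simp [hO, hdot] at h
          · simp [hget, hO, hdot]
  · rw [if_neg (by omega : ¬(2 ≤ j ∧ j < n - 1)), dif_neg hg]
    exact ⟨rfl, rfl⟩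

theorem needed_zero_of_id (n : Int) (ρ : List String) (j : Int)
    (h : tiltMove n ρ j = (ρ, j)) : needed n ρ j = 0 := by
  rw [tiltMove] at h
  rw [needed]
  by_cases hg : 2 ≤ j ∧ j ≤ n - 2
  · rw [if_pos (by omega : 2 ≤ j ∧ j < n - 1)] at h
    rw [dif_pos hg]
    cases hget : PySem.List.pyGet? ρ (j - 1) with
    | none => simp
    | some c =>
        rw [hget] at h
        by_cases hO : c = "O"
        · simp [hO, Prod.ext_iff] at h
          exact absurd h.2 (by omega)
        · by_cases hdot : c = "."
          · simp [hO, hdot, Prod.ext_iff] at h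
          · simp [hO, hdot]
  · rw [dif_neg hg]

theorem length_applyRest (n : Int) (ρ : List String) (j : Int) :
    ((applyRest n ρ j).1).length = ρ.length := by
  unfold applyRest
  split
  · rfl
  · split <;> simp

theorem applyRest_stuck (n : Int) (ρ : List String) (j : Int) (hn : n = ρ.length)
    (hj : j < n) (h : needed n ρ j = 0) : applyRest n ρ j = (ρ, j) := by
  by_cases h0 : j < 0
  · rw [applyRest, if_pos h0]
  · have hw : restWalk n ρ j = some j := (stuck_of_needed_zero n ρ j h).2
    rw [applyRest, if_neg h0, hw]
    have hlt : j.toNat < ρ.length := by omega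
    show ((ρ.set j.toNat ".").set j.toNat (PySem.List.pyGetD ρ j ""), j) = (ρ, j)
    rw [List.set_set, PySem.List.pyGetD_eq_getElem ρ "" (by omega) (by omega),
      List.set_getElem_self hlt]

theorem needed_le (m : Int) (ρ : List String) (j : Int) :
    needed m ρ j ≤ (j - 1).toNat := by
  fun_induction needed m ρ j with
  | case1 j hg hget => omega
  | case2 j hg hget hne ih => omega
  | case3 j hg c hget hO hdot => omega
  | case4 j hg hget => omega
  | case5 j hg => omega

theorem needed_bound (m : Int) (ρ : List String) (j : Int) :
    needed m ρ j ≤ (m - 3).toNat := by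
  rw [needed]
  by_cases hg : 2 ≤ j ∧ j ≤ m - 2
  · rw [dif_pos hg]
    cases hget : PySem.List.pyGet? ρ (j - 1) with
    | none => simp
    | some c =>
        have h1 := needed_le m ρ (j - 1)
        by_cases hO : c = "O"
        · simp [hO]; omega
        · by_cases hdot : c = "."
          · simp [hO, hdot]; omega
          · simp [hO, hdot]
  · rw [dif_neg hg]; omega

theorem needed_step (n : Int) (ρ : List String) (j : Int) (hn : n = ρ.length)
    (h : needed n ρ j ≠ 0) :
    needed n (tiltMove n ρ j).1 (tiltMove n ρ j).2 = needed n ρ j - 1 := by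
  rw [needed] at h
  by_cases hg : 2 ≤ j ∧ j ≤ n - 2
  · rw [dif_pos hg] at h
    cases hget : PySem.List.pyGet? ρ (j - 1) with
    | none => rw [hget] at h; simp at h
    | some c =>
        rw [hget] at h
        by_cases hO : c = "O"
        · have ht : tiltMove n ρ j = (ρ.set j.toNat ".", -1) := by
            rw [tiltMove, if_pos (by omega : 2 ≤ j ∧ j < n - 1), hget]; simp [hO]
          rw [ht]
          show needed n (ρ.set j.toNat ".") (-1) = needed n ρ j - 1
          rw [needed, dif_neg (by omega : ¬(2 ≤ (-1:Int) ∧ (-1:Int) ≤ n - 2))]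
          conv_rhs => rw [needed, dif_pos hg, hget]
          simp [hO]
        · by_cases hdot : c = "."
          · have ht : tiltMove n ρ j
                = ((ρ.set (j - 1).toNat (PySem.List.pyGetD ρ j "")).set j.toNat c, j - 1) := by
              rw [tiltMove, if_pos (by omega : 2 ≤ j ∧ j < n - 1), hget]; simp [hO, hdot]
            rw [ht]
            show needed n ((ρ.set (j - 1).toNat (PySem.List.pyGetD ρ j "")).set j.toNat c) (j - 1)
                = needed n ρ j - 1
            rw [← needed_congr n ρ (j - 1)
                ((ρ.set (j - 1).toNat (PySem.List.pyGetD ρ j "")).set j.toNat c)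
                (by
                  intro i hi
                  simp only [List.getElem?_set]
                  split_ifs <;> first | rfl | omega)]
            conv_rhs => rw [needed, dif_pos hg, hget]
            simp [hO, hdot]
          · simp [hO, hdot] at h
  · rw [dif_neg hg] at h; omega

theorem absorb (n : Int) (ρ : List String) (j : Int) (hn : n = ρ.length) :
    applyRest n (tiltMove n ρ j).1 (tiltMove n ρ j).2 = applyRest n ρ j := by
  by_cases hg : 2 ≤ j ∧ j ≤ n - 2
  · cases hget : PySem.List.pyGet? ρ (j - 1) with
    | none =>
        have ht : tiltMove n ρ j = (ρ, j) := by
          rw [tiltMove, if_pos (by omega : 2 ≤ j ∧ j < n - 1), hget]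
        rw [ht]
    | some c =>
        have hc : ρ[(j-1).toNat]? = some c := by
          rw [← PySem.List.pyGet?_of_nonneg ρ (by omega)]; exact hget
        by_cases hO : c = "O"
        · have ht : tiltMove n ρ j = (ρ.set j.toNat ".", -1) := by
            rw [tiltMove, if_pos (by omega : 2 ≤ j ∧ j < n - 1), hget]; simp [hO]
          have hw : restWalk n ρ j = none := by
            rw [restWalk, dif_pos hg, hget]; simp [hO]
          rw [ht]
          show applyRest n (ρ.set j.toNat ".") (-1) = applyRest n ρ j
          rw [applyRest, applyRest, if_pos (show (-1:Int) < 0 by norm_num),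
            if_neg (by omega : ¬ (j < 0)), hw]
        · by_cases hdot : c = "."
          · have ht : tiltMove n ρ j
                = ((ρ.set (j - 1).toNat (PySem.List.pyGetD ρ j "")).set j.toNat c, j - 1) := by
              rw [tiltMove, if_pos (by omega : 2 ≤ j ∧ j < n - 1), hget]; simp [hO, hdot]
            have hw : restWalk n ρ j = restWalk n ρ (j - 1) := by
              rw [restWalk, dif_pos hg, hget]; simp [hO, hdot]
            have hw' : restWalk n ((ρ.set (j - 1).toNat (PySem.List.pyGetD ρ j "")).set j.toNat c) (j - 1)
                = restWalk n ρ (j - 1) := by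
              apply restWalk_congr
              intro i hi
              simp only [List.getElem?_set]
              split_ifs <;> first | rfl | omega
            rw [ht]
            show applyRest n ((ρ.set (j - 1).toNat (PySem.List.pyGetD ρ j "")).set j.toNat c) (j - 1)
                = applyRest n ρ j
            rw [applyRest, applyRest, if_neg (by omega : ¬ (j - 1 < 0)), if_neg (by omega : ¬ (j < 0)), hw, hw']
            cases hrw : restWalk n ρ (j - 1) with
            | none =>
                show (((ρ.set (j - 1).toNat (PySem.List.pyGetD ρ j "")).set j.toNat c).set (j-1).toNat ".", (-1:Int))
                    = (ρ.set j.toNat ".", -1)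
                refine Prod.ext ?_ rfl
                apply List.ext_getElem?
                intro i
                simp only [List.getElem?_set, List.length_set]
                split_ifs <;> first | rfl | omega | (rw [hdot] at hc; simp_all)
            | some p =>
                have hple := restWalk_le n ρ (j-1) p hrw
                have hpn := restWalk_nonneg n ρ (j-1) p (by omega) hrw
                show (((((ρ.set (j - 1).toNat (PySem.List.pyGetD ρ j "")).set j.toNat c).set (j-1).toNat ".").set p.toNat
                      (PySem.List.pyGetD ((ρ.set (j - 1).toNat (PySem.List.pyGetD ρ j "")).set j.toNat c) (j-1) "")), p)
                    = (((ρ.set j.toNat ".").set p.toNat (PySem.List.pyGetD ρ j "")), p)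
                refine Prod.ext ?_ rfl
                have hv : PySem.List.pyGetD ((ρ.set (j - 1).toNat (PySem.List.pyGetD ρ j "")).set j.toNat c) (j-1) ""
                    = PySem.List.pyGetD ρ j "" := by
                  rw [PySem.List.pyGetD_eq_getElem _ "" (by omega) (by simp; omega),
                    PySem.List.pyGetD_eq_getElem ρ "" (by omega) (by omega)]
                  simp only [List.getElem_set]
                  rw [if_neg (by omega : ¬ (j.toNat = (j-1).toNat))]
                  simp
                rw [hv]
                apply List.ext_getElem?
                intro i
                simp only [List.getElem?_set, List.length_set]
                split_ifs <;> first | rfl | omega | (rw [hdot] at hc; simp_all)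
          · have ht : tiltMove n ρ j = (ρ, j) := by
              rw [tiltMove, if_pos (by omega : 2 ≤ j ∧ j < n - 1), hget]; simp [hO, hdot]
            rw [ht]
  · have ht : tiltMove n ρ j = (ρ, j) := by
      rw [tiltMove, if_neg (by omega : ¬ (2 ≤ j ∧ j < n - 1))]
    rw [ht]

theorem front_sub (n : Int) (ρ : List String) (f : Int) (hn : n = ρ.length)
    (hf : f = -1 ∨ (0 ≤ f ∧ f < n ∧ BeadCell ρ f)) :
    ((tiltMove n ρ f).2 = -1 ∨
      (0 ≤ (tiltMove n ρ f).2 ∧ (tiltMove n ρ f).2 < n ∧ BeadCell (tiltMove n ρ f).1 (tiltMove n ρ f).2)) ∧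
    (tiltMove n ρ f).2 ≤ f ∧
    ((tiltMove n ρ f).2 = f → ((tiltMove n ρ f).1 = ρ ∧ needed n ρ f = 0)) := by
  by_cases hg : 2 ≤ f ∧ f ≤ n - 2
  · cases hget : PySem.List.pyGet? ρ (f - 1) with
    | none =>
        have ht : tiltMove n ρ f = (ρ, f) := by
          rw [tiltMove, if_pos (by omega : 2 ≤ f ∧ f < n - 1), hget]
        rw [ht]
        refine ⟨hf, le_refl f, fun _ => ⟨rfl, needed_zero_of_id n ρ f ht⟩⟩
    | some c =>
        by_cases hO : c = "O"
        · have ht : tiltMove n ρ f = (ρ.set f.toNat ".", -1) := by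
            rw [tiltMove, if_pos (by omega : 2 ≤ f ∧ f < n - 1), hget]; simp [hO]
          rw [ht]
          exact ⟨Or.inl rfl, by omega, by omega⟩
        · by_cases hdot : c = "."
          · have ht : tiltMove n ρ f
                = ((ρ.set (f - 1).toNat (PySem.List.pyGetD ρ f "")).set f.toNat c, f - 1) := by
              rw [tiltMove, if_pos (by omega : 2 ≤ f ∧ f < n - 1), hget]; simp [hO, hdot]
            rw [ht]
            rcases hf with hf | ⟨h0, h1, hcell⟩
            · omega
            refine ⟨Or.inr ⟨by omega, by omega, ?_⟩, by omega, by omega⟩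
            constructor <;>
            · show ¬ _
              rw [PySem.List.pyGetD_eq_getElem _ "" (by omega) (by simp; omega)]
              simp only [List.getElem_set]
              rw [if_neg (by omega : ¬ (f.toNat = (f-1).toNat))]
              first
                | simpa using hcell.1
                | simpa using hcell.2
          · have ht : tiltMove n ρ f = (ρ, f) := by
              rw [tiltMove, if_pos (by omega : 2 ≤ f ∧ f < n - 1), hget]; simp [hO, hdot]
            rw [ht]
            exact ⟨hf, le_refl f, fun _ => ⟨rfl, needed_zero_of_id n ρ f ht⟩⟩
  · have ht : tiltMove n ρ f = (ρ, f) := by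
      rw [tiltMove, if_neg (by omega : ¬ (2 ≤ f ∧ f < n - 1))]
    rw [ht]
    exact ⟨hf, le_refl f, fun _ => ⟨rfl, needed_zero_of_id n ρ f ht⟩⟩

theorem applyRest_fst_getElem_high (n : Int) (ρ : List String) (f : Int) (hf0 : 0 ≤ f)
    (i : Nat) (hi : f < (i : Int)) : ((applyRest n ρ f).1)[i]? = ρ[i]? := by
  rw [applyRest, if_neg (by omega : ¬ (f < 0))]
  cases hw : restWalk n ρ f with
  | none =>
      show (ρ.set f.toNat ".")[i]? = ρ[i]?
      rw [List.getElem?_set, if_neg (by omega : ¬ (f.toNat = i))]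
  | some p =>
      have h1 := restWalk_le n ρ f p hw
      have h2 := restWalk_nonneg n ρ f p hf0 hw
      show ((ρ.set f.toNat ".").set p.toNat (PySem.List.pyGetD ρ f ""))[i]? = ρ[i]?
      rw [List.getElem?_set, if_neg (by omega : ¬ (p.toNat = i)),
        List.getElem?_set, if_neg (by omega : ¬ (f.toNat = i))]

theorem applyRest_set_high (n : Int) (ρ : List String) (f : Int) (hf0 : 0 ≤ f)
    (hfn : f < (ρ.length : Int)) (k : Nat) (hk : f < (k : Int)) (v : String) :
    applyRest n (ρ.set k v) f = ((applyRest n ρ f).1.set k v, (applyRest n ρ f).2) := by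
  have hwc : restWalk n (ρ.set k v) f = restWalk n ρ f := by
    apply restWalk_congr
    intro i hi
    rw [List.getElem?_set, if_neg (by omega : ¬ (k = i))]
  have hvc : PySem.List.pyGetD (ρ.set k v) f "" = PySem.List.pyGetD ρ f "" := by
    rw [PySem.List.pyGetD_eq_getElem _ "" hf0 (by simp; omega),
      PySem.List.pyGetD_eq_getElem ρ "" hf0 (by omega)]
    rw [List.getElem_set, if_neg (by omega : ¬ (k = f.toNat))]
  rw [applyRest, applyRest, if_neg (by omega : ¬ (f < 0)), if_neg (by omega : ¬ (f < 0)), hwc]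
  cases hw : restWalk n ρ f with
  | none =>
      show ((ρ.set k v).set f.toNat ".", (-1:Int)) = ((ρ.set f.toNat ".").set k v, -1)
      rw [List.set_comm _ _ (by omega : k ≠ f.toNat)]
  | some p =>
      have h1 := restWalk_le n ρ f p hw
      have h2 := restWalk_nonneg n ρ f p hf0 hw
      show (((ρ.set k v).set f.toNat ".").set p.toNat (PySem.List.pyGetD (ρ.set k v) f ""), p)
          = (((ρ.set f.toNat ".").set p.toNat (PySem.List.pyGetD ρ f "")).set k v, p)
      rw [hvc, List.set_comm _ _ (by omega : k ≠ f.toNat),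
        List.set_comm _ _ (by omega : k ≠ p.toNat)]

theorem intertwine (n : Int) (ρ : List String) (f b : Int)
    (hn : n = ρ.length)
    (hf : f = -1 ∨ (0 ≤ f ∧ f < n ∧ BeadCell ρ f))
    (hfb : f ≠ -1 → b ≠ -1 → f < b)
    (hadj : b = f + 1 → needed n ρ f = 0) :
    applyRest n (tiltMove n ρ b).1 f
        = ((tiltMove n (applyRest n ρ f).1 b).1, (applyRest n ρ f).2)
      ∧ (tiltMove n ρ b).2 = (tiltMove n (applyRest n ρ f).1 b).2 := by
  rcases hf with hfdead | ⟨hf0, hfn, hcell⟩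
  · subst hfdead
    have hid : ∀ τ : List String, applyRest n τ (-1) = (τ, -1) := fun τ => by
      rw [applyRest, if_pos (by norm_num : (-1:Int) < 0)]
    rw [hid ρ]
    exact ⟨by rw [hid], rfl⟩
  · have hσlen : ((applyRest n ρ f).1).length = ρ.length := length_applyRest n ρ f
    by_cases hbg : 2 ≤ b ∧ b ≤ n - 2
    · have hflt : f < b := hfb (by omega) (by omega)
      by_cases hbf : b = f + 1
      · have h0 := hadj hbf
        have hstk := applyRest_stuck n ρ f hn (by omega) h0
        have hgf : PySem.List.pyGet? ρ (b - 1) = some (PySem.List.pyGetD ρ f "") := by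
          rw [show b - 1 = f by omega, PySem.List.pyGet?_of_nonneg ρ (by omega),
            PySem.List.pyGetD_eq_getElem ρ "" (by omega) (by omega)]
          exact List.getElem?_eq_getElem (by omega)
        have ht : tiltMove n ρ b = (ρ, b) := by
          rw [tiltMove, if_pos (by omega : 2 ≤ b ∧ b < n - 1), hgf]
          simp [hcell.1, hcell.2]
        rw [ht, hstk]
        exact ⟨by rw [show (ρ, f).1 = ρ from rfl, ht], by rw [show (ρ, f).1 = ρ from rfl, ht]⟩
      · have hlt : f < b - 1 := by omega
        have hgσ : PySem.List.pyGet? (applyRest n ρ f).1 (b - 1) = PySem.List.pyGet? ρ (b - 1) := by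
          rw [PySem.List.pyGet?_of_nonneg _ (by omega), PySem.List.pyGet?_of_nonneg ρ (by omega)]
          exact applyRest_fst_getElem_high n ρ f (by omega) (b-1).toNat (by omega)
        cases hget : PySem.List.pyGet? ρ (b - 1) with
        | none =>
            have ht : tiltMove n ρ b = (ρ, b) := by
              rw [tiltMove, if_pos (by omega : 2 ≤ b ∧ b < n - 1), hget]
            have htσ : tiltMove n (applyRest n ρ f).1 b = ((applyRest n ρ f).1, b) := by
              rw [tiltMove, if_pos (by omega : 2 ≤ b ∧ b < n - 1), hgσ, hget]
            rw [ht, htσ]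
            exact ⟨rfl, rfl⟩
        | some c =>
            by_cases hO : c = "O"
            · have ht : tiltMove n ρ b = (ρ.set b.toNat ".", -1) := by
                rw [tiltMove, if_pos (by omega : 2 ≤ b ∧ b < n - 1), hget]; simp [hO]
              have htσ : tiltMove n (applyRest n ρ f).1 b
                  = ((applyRest n ρ f).1.set b.toNat ".", -1) := by
                rw [tiltMove, if_pos (by omega : 2 ≤ b ∧ b < n - 1), hgσ, hget]; simp [hO]
              rw [ht, htσ]
              refine ⟨?_, rfl⟩
              show applyRest n (ρ.set b.toNat ".") f = _
              rw [applyRest_set_high n ρ f (by omega) (by omega) b.toNat (by omega) "."]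
            · by_cases hdot : c = "."
              · have hvb : PySem.List.pyGetD (applyRest n ρ f).1 b "" = PySem.List.pyGetD ρ b "" := by
                  rw [PySem.List.pyGetD_eq_getElem _ "" (by omega) (by omega),
                    PySem.List.pyGetD_eq_getElem ρ "" (by omega) (by omega)]
                  have := applyRest_fst_getElem_high n ρ f (by omega) b.toNat (by omega)
                  rw [List.getElem?_eq_getElem (by omega), List.getElem?_eq_getElem (by omega)] at this
                  exact Option.some.inj this
                have ht : tiltMove n ρ b
                    = ((ρ.set (b - 1).toNat (PySem.List.pyGetD ρ b "")).set b.toNat c, b - 1) := by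
                  rw [tiltMove, if_pos (by omega : 2 ≤ b ∧ b < n - 1), hget]; simp [hO, hdot]
                have htσ : tiltMove n (applyRest n ρ f).1 b
                    = (((applyRest n ρ f).1.set (b - 1).toNat (PySem.List.pyGetD ρ b "")).set b.toNat c, b - 1) := by
                  rw [tiltMove, if_pos (by omega : 2 ≤ b ∧ b < n - 1), hgσ, hget, hvb]; simp [hO, hdot]
                rw [ht, htσ]
                refine ⟨?_, rfl⟩
                show applyRest n ((ρ.set (b - 1).toNat (PySem.List.pyGetD ρ b "")).set b.toNat c) f = _
                rw [applyRest_set_high n _ f (by omega) (by simp; omega) b.toNat (by omega) c,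
                  applyRest_set_high n ρ f (by omega) (by omega) (b-1).toNat (by omega) _]
              · have ht : tiltMove n ρ b = (ρ, b) := by
                  rw [tiltMove, if_pos (by omega : 2 ≤ b ∧ b < n - 1), hget]; simp [hO, hdot]
                have htσ : tiltMove n (applyRest n ρ f).1 b = ((applyRest n ρ f).1, b) := by
                  rw [tiltMove, if_pos (by omega : 2 ≤ b ∧ b < n - 1), hgσ, hget]; simp [hO, hdot]
                rw [ht, htσ]
                exact ⟨rfl, rfl⟩
    · have ht : tiltMove n ρ b = (ρ, b) := by
        rw [tiltMove, if_neg (by omega : ¬ (2 ≤ b ∧ b < n - 1))]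
      have htσ : tiltMove n (applyRest n ρ f).1 b = ((applyRest n ρ f).1, b) := by
        rw [tiltMove, if_neg (by omega : ¬ (2 ≤ b ∧ b < n - 1))]
      rw [ht, htσ]
      exact ⟨rfl, rfl⟩

theorem tiltMove_writes (n : Int) (ρ : List String) (j : Int) (i : Nat)
    (h1 : ¬ ((i : Int) = j - 1)) (h2 : ¬ ((i : Int) = j)) :
    ((tiltMove n ρ j).1)[i]? = ρ[i]? := by
  by_cases hg : 2 ≤ j ∧ j < n - 1
  · cases hget : PySem.List.pyGet? ρ (j - 1) with
    | none => rw [tiltMove, if_pos hg, hget]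
    | some c =>
        by_cases hO : c = "O"
        · have ht : tiltMove n ρ j = (ρ.set j.toNat ".", -1) := by
            rw [tiltMove, if_pos hg, hget]; simp [hO]
          rw [ht]
          show (ρ.set j.toNat ".")[i]? = ρ[i]?
          rw [List.getElem?_set, if_neg (by omega)]
        · by_cases hdot : c = "."
          · have ht : tiltMove n ρ j
                = ((ρ.set (j - 1).toNat (PySem.List.pyGetD ρ j "")).set j.toNat c, j - 1) := by
              rw [tiltMove, if_pos hg, hget]; simp [hO, hdot]
            rw [ht]
            show (((ρ.set (j - 1).toNat (PySem.List.pyGetD ρ j "")).set j.toNat c))[i]? = ρ[i]?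
            rw [List.getElem?_set, if_neg (by omega), List.getElem?_set, if_neg (by omega)]
          · have ht : tiltMove n ρ j = (ρ, j) := by
              rw [tiltMove, if_pos hg, hget]; simp [hO, hdot]
            rw [ht]
  · rw [tiltMove, if_neg hg]

theorem tiltMove_snd_cases' (n : Int) (ρ : List String) (j : Int) :
    (tiltMove n ρ j).2 = j ∨ (2 ≤ j ∧ (tiltMove n ρ j).2 = j - 1) ∨ (2 ≤ j ∧ (tiltMove n ρ j).2 = -1) := by
  by_cases hg : 2 ≤ j ∧ j < n - 1
  · cases hget : PySem.List.pyGet? ρ (j - 1) with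
    | none => left; rw [tiltMove, if_pos hg, hget]
    | some c =>
        by_cases hO : c = "O"
        · have ht : tiltMove n ρ j = (ρ.set j.toNat ".", -1) := by
            rw [tiltMove, if_pos hg, hget]; simp [hO]
          right; right; rw [ht]; exact ⟨hg.1, rfl⟩
        · by_cases hdot : c = "."
          · have ht : tiltMove n ρ j
                = ((ρ.set (j - 1).toNat (PySem.List.pyGetD ρ j "")).set j.toNat c, j - 1) := by
              rw [tiltMove, if_pos hg, hget]; simp [hO, hdot]
            right; left; rw [ht]; exact ⟨hg.1, rfl⟩
          · have ht : tiltMove n ρ j = (ρ, j) := by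
              rw [tiltMove, if_pos hg, hget]; simp [hO, hdot]
            left; rw [ht]
  · left; rw [tiltMove, if_neg hg]
theorem beadcell_set (ρ : List String) (i : Int) (k : Nat) (v : String)
    (h : BeadCell ρ i) (h0 : 0 ≤ i) (hin : i < (ρ.length : Int)) (hne : ¬((i : Int) = (k : Int))) :
    BeadCell (ρ.set k v) i := by
  unfold BeadCell at *
  rw [PySem.List.pyGetD_eq_getElem _ "" h0 (by simp; omega),
    List.getElem_set, if_neg (by omega : ¬ (k = i.toNat))]
  rw [PySem.List.pyGetD_eq_getElem ρ "" h0 (by omega)] at h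
  exact h

theorem inv_preserved (n : Int) (ρ : List String) (f b : Int) (h : BInv n ρ f b) :
    BInv n (tiltMove n (tiltMove n ρ f).1 b).1 (tiltMove n ρ f).2 (tiltMove n (tiltMove n ρ f).1 b).2 := by
  obtain ⟨hn, hf, hb, hfb⟩ := h
  obtain ⟨hf1, hle, hidf⟩ := front_sub n ρ f hn hf
  have hn1 : n = ((tiltMove n ρ f).1).length := by rw [length_tiltMove]; exact hn
  have hfd : f = -1 → (tiltMove n ρ f).2 = -1 := by
    intro hfe; rw [hfe, tiltMove, if_neg (by omega : ¬ (2 ≤ (-1:Int) ∧ (-1:Int) < n - 1))]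
  have hflt' : (tiltMove n ρ f).2 ≠ -1 → b ≠ -1 → (tiltMove n ρ f).2 < b := by
    intro h1 h2
    have hfne : f ≠ -1 := by intro hc; exact h1 (hfd hc)
    exact lt_of_le_of_lt hle (hfb hfne h2)
  by_cases hbg : 2 ≤ b ∧ b ≤ n - 2
  · cases hget : PySem.List.pyGet? (tiltMove n ρ f).1 (b - 1) with
    | none =>
        have ht : tiltMove n (tiltMove n ρ f).1 b = ((tiltMove n ρ f).1, b) := by
          rw [tiltMove, if_pos (by omega : 2 ≤ b ∧ b < n - 1), hget]
        rw [ht]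
        exact ⟨hn1, hf1, hb, hflt'⟩
    | some c =>
        have hcb : ((tiltMove n ρ f).1)[(b-1).toNat]? = some c := by
          rw [← PySem.List.pyGet?_of_nonneg _ (by omega : (0:Int) ≤ b - 1)]; exact hget
        by_cases hO : c = "O"
        · have ht : tiltMove n (tiltMove n ρ f).1 b = ((tiltMove n ρ f).1.set b.toNat ".", -1) := by
            rw [tiltMove, if_pos (by omega : 2 ≤ b ∧ b < n - 1), hget]; simp [hO]
          rw [ht]
          refine ⟨by simpa using hn1, ?_, Or.inl rfl, fun _ h2 => absurd rfl h2⟩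
          rcases hf1 with h1 | ⟨ha, hbn, hcell⟩
          · exact Or.inl h1
          · refine Or.inr ⟨ha, hbn, beadcell_set _ _ _ _ hcell ha (by omega) ?_⟩
            have := hflt' (by omega) (by omega)
            omega
        · by_cases hdot : c = "."
          · have ht : tiltMove n (tiltMove n ρ f).1 b
                = (((tiltMove n ρ f).1.set (b - 1).toNat
                    (PySem.List.pyGetD (tiltMove n ρ f).1 b "")).set b.toNat c, b - 1) := by
              rw [tiltMove, if_pos (by omega : 2 ≤ b ∧ b < n - 1), hget]; simp [hO, hdot]
            rw [ht]
            have hne1 : (tiltMove n ρ f).2 ≠ -1 → ¬ ((tiltMove n ρ f).2 = b - 1) := by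
              intro halive hc
              rcases hf1 with h1 | ⟨ha, hbn, hcell⟩
              · exact halive h1
              · have hq : ((tiltMove n ρ f).1)[(tiltMove n ρ f).2.toNat]? = some "." := by
                  rw [show (tiltMove n ρ f).2.toNat = (b-1).toNat by omega]
                  rw [hdot] at hcb; exact hcb
                have : PySem.List.pyGetD (tiltMove n ρ f).1 (tiltMove n ρ f).2 "" = "." := by
                  rw [PySem.List.pyGetD_eq_getElem _ "" ha (by omega)]
                  rw [List.getElem?_eq_getElem (by omega)] at hq
                  exact Option.some.inj hq
                exact hcell.1 this
            refine ⟨by simpa using hn1, ?_, Or.inr ⟨by omega, by omega⟩, ?_⟩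
            · rcases hf1 with h1 | ⟨ha, hbn, hcell⟩
              · exact Or.inl h1
              · have hlt := hflt' (by omega) (by omega)
                have hneb1 := hne1 (by omega)
                refine Or.inr ⟨ha, hbn, ?_⟩
                refine beadcell_set _ _ _ _ ?_ ha (by simp; omega) (by omega)
                exact beadcell_set _ _ _ _ hcell ha (by omega) (by omega)
            · intro h1 _
              have := hflt' h1 (by omega)
              have := hne1 h1
              omega
          · have ht : tiltMove n (tiltMove n ρ f).1 b = ((tiltMove n ρ f).1, b) := by
              rw [tiltMove, if_pos (by omega : 2 ≤ b ∧ b < n - 1), hget]; simp [hO, hdot]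
            rw [ht]
            exact ⟨hn1, hf1, hb, hflt'⟩
  · have ht : tiltMove n (tiltMove n ρ f).1 b = ((tiltMove n ρ f).1, b) := by
      rw [tiltMove, if_neg (by omega : ¬ (2 ≤ b ∧ b < n - 1))]
    rw [ht]
    exact ⟨hn1, hf1, hb, hflt'⟩

theorem mainIter (T : Nat) : ∀ (n : Int) (ρ : List String) (f b : Int),
    BInv n ρ f b → needed n ρ f ≤ T → needed n (applyRest n ρ f).1 b ≤ T →
    (fullStepN n)^[T] (ρ, (f, b)) = G n (ρ, (f, b)) := by
  induction T with
  | zero =>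
      intro n ρ f b hinv hF hB
      obtain ⟨hn, hf, hb, hfb⟩ := hinv
      have h0f : needed n ρ f = 0 := Nat.le_zero.mp hF
      have hjf : f < n := by rcases hf with h | h <;> omega
      have ha1 : applyRest n ρ f = (ρ, f) := applyRest_stuck n ρ f hn hjf h0f
      rw [ha1] at hB
      have h0b : needed n ρ b = 0 := Nat.le_zero.mp hB
      have hjb : b < n := by rcases hb with h | h <;> omega
      have ha2 : applyRest n ρ b = (ρ, b) := applyRest_stuck n ρ b hn hjb h0b
      show (ρ, (f, b)) = G n (ρ, (f, b))
      unfold G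
      rw [ha1]
      show (ρ, (f, b)) = ((applyRest n ρ b).1, (f, (applyRest n ρ b).2))
      rw [ha2]
  | succ T ih =>
      intro n ρ f b hinv hF hB
      obtain ⟨hn, hf, hb, hfb⟩ := hinv
      obtain ⟨hf1, hle, hidf⟩ := front_sub n ρ f hn hf
      have hn1 : n = ((tiltMove n ρ f).1).length := by rw [length_tiltMove]; exact hn
      have hσlen : n = ((applyRest n ρ f).1).length := by rw [length_applyRest]; exact hn
      have hfd : f = -1 → (tiltMove n ρ f).2 = -1 := by
        intro hfe; rw [hfe, tiltMove, if_neg (by omega : ¬ (2 ≤ (-1:Int) ∧ (-1:Int) < n - 1))]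
      have hab : applyRest n (tiltMove n ρ f).1 (tiltMove n ρ f).2 = applyRest n ρ f :=
        absorb n ρ f hn
      -- the front bead still needs at most T iterations
      have hF1 : needed n (tiltMove n ρ f).1 (tiltMove n ρ f).2 ≤ T := by
        by_cases h0 : needed n ρ f = 0
        · have hid := (stuck_of_needed_zero n ρ f h0).1
          rw [hid]; simpa using Nat.le_of_eq h0 |>.trans (Nat.zero_le T)
        · rw [needed_step n ρ f hn h0]; omega
      -- hadj for the intertwine lemma at the mid state
      have hadj : b = (tiltMove n ρ f).2 + 1 → needed n (tiltMove n ρ f).1 (tiltMove n ρ f).2 = 0 := by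
        intro hbe
        rcases tiltMove_snd_cases' n ρ f with hc | ⟨h2f, hc⟩ | ⟨h2f, hc⟩
        · obtain ⟨he, h0⟩ := hidf hc
          rw [he, hc]; exact h0
        · exfalso
          have : b = f := by omega
          have := hfb (by omega) (by omega)
          omega
        · rw [hc, needed, dif_neg (by omega : ¬ (2 ≤ (-1:Int) ∧ (-1:Int) ≤ n - 2))]
      have hfb1 : (tiltMove n ρ f).2 ≠ -1 → b ≠ -1 → (tiltMove n ρ f).2 < b := by
        intro h1 h2
        have hfne : f ≠ -1 := by intro hc; exact h1 (hfd hc)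
        exact lt_of_le_of_lt hle (hfb hfne h2)
      have hI := intertwine n (tiltMove n ρ f).1 (tiltMove n ρ f).2 b hn1 hf1 hfb1 hadj
      rw [hab] at hI
      -- needed for the back bead after this iteration
      have hB1 : needed n (applyRest n (tiltMove n (tiltMove n ρ f).1 b).1 (tiltMove n ρ f).2).1
          (tiltMove n (tiltMove n ρ f).1 b).2 ≤ T := by
        rw [hI.1, hI.2]
        show needed n (tiltMove n (applyRest n ρ f).1 b).1 (tiltMove n (applyRest n ρ f).1 b).2 ≤ T
        by_cases h0 : needed n (applyRest n ρ f).1 b = 0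
        · rw [(stuck_of_needed_zero n (applyRest n ρ f).1 b h0).1]
          simp [h0]
        · rw [needed_step n (applyRest n ρ f).1 b hσlen h0]
          omega
      -- the front bead's count transfers through the back substep
      have hF1' : needed n (tiltMove n (tiltMove n ρ f).1 b).1 (tiltMove n ρ f).2 ≤ T := by
        rcases hf1 with hdead | ⟨ha, hbn, hcell⟩
        · rw [hdead, needed, dif_neg (by omega : ¬ (2 ≤ (-1:Int) ∧ (-1:Int) ≤ n - 2))]
          omega
        · by_cases hbd : b = -1
          · have ht : tiltMove n (tiltMove n ρ f).1 b = ((tiltMove n ρ f).1, b) := by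
              rw [hbd, tiltMove, if_neg (by omega : ¬ (2 ≤ (-1:Int) ∧ (-1:Int) < n - 1))]
            rw [ht]; exact hF1
          · have hflt := hfb1 (by omega) hbd
            rw [needed_congr n (tiltMove n (tiltMove n ρ f).1 b).1 (tiltMove n ρ f).2 (tiltMove n ρ f).1
              (fun i hi => tiltMove_writes n (tiltMove n ρ f).1 b i (by omega) (by omega))]
            exact hF1
      rw [Function.iterate_succ_apply]
      have hsteq : fullStepN n (ρ, (f, b))
          = ((tiltMove n (tiltMove n ρ f).1 b).1, ((tiltMove n ρ f).2, (tiltMove n (tiltMove n ρ f).1 b).2)) := rfl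
      rw [hsteq, ih n _ _ _ (inv_preserved n ρ f b ⟨hn, hf, hb, hfb⟩) hF1' hB1]
      simp only [G]
      rw [hI.1, hI.2]
      show ((applyRest n (tiltMove n (applyRest n ρ f).1 b).1 (tiltMove n (applyRest n ρ f).1 b).2).1,
          ((applyRest n ρ f).2,
            (applyRest n (tiltMove n (applyRest n ρ f).1 b).1 (tiltMove n (applyRest n ρ f).1 b).2).2))
        = _
      rw [absorb n (applyRest n ρ f).1 b hσlen]

theorem settle_single (n : Int) (row : List String) (i : Nat)
    (hn : n = row.length) (hi : i < row.length) :
    (G n (row, ((-1 : Int), (i : Int)))).1 =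
      [i].foldl
        (fun acc (i : Nat) =>
          match restWalk (acc.length : Int) acc (i : Int) with
          | some p => acc.set p.toNat (row.getD i "")
          | none => acc)
        (row.set i ".") := by
  have hid : applyRest n row (-1) = (row, -1) := by
    rw [applyRest, if_pos (by norm_num : (-1:Int) < 0)]
  show (applyRest n (applyRest n row (-1)).1 ↑i).1 = _
  rw [hid]
  show (applyRest n row ↑i).1 = _
  have hwc : restWalk ((row.set i ".").length : Int) (row.set i ".") ↑i = restWalk n row ↑i := by
    rw [List.length_set, ← hn]
    apply restWalk_congr
    intro k hk
    rw [List.getElem?_set, if_neg (by omega : ¬ (i = k))]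
  rw [applyRest, if_neg (by omega : ¬ ((i:Int) < 0))]
  simp only [List.foldl_cons, List.foldl_nil, hwc]
  cases hw : restWalk n row ↑i with
  | none => simp
  | some p =>
      simp only [Int.toNat_natCast]
      rw [PySem.List.pyGetD_eq_getElem row "" (by omega) (by omega)]
      rw [List.getD_eq_getElem?_getD, List.getElem?_eq_getElem hi]
      simp

theorem settle_pair (n : Int) (row : List String) (fi bi : Nat)
    (hn : n = row.length) (hfb : fi < bi) (hb : bi < row.length) :
    (G n (row, ((fi : Int), (bi : Int)))).1 =
      [fi, bi].foldl
        (fun acc (i : Nat) =>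
          match restWalk (acc.length : Int) acc (i : Int) with
          | some p => acc.set p.toNat (row.getD i "")
          | none => acc)
        ((row.set fi ".").set bi ".") := by
  have hfi : fi < row.length := lt_trans hfb hb
  -- first bead: the walk over the cleared row equals the walk applyRest makes
  have hwc1 : restWalk ((((row.set fi ".").set bi ".")).length : Int) ((row.set fi ".").set bi ".") ↑fi
      = restWalk n row ↑fi := by
    simp only [List.length_set, ← hn]
    apply restWalk_congr
    intro k hk
    rw [List.getElem?_set, if_neg (by omega : ¬ (bi = k)), List.getElem?_set,
      if_neg (by omega : ¬ (fi = k))]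
  have hval : PySem.List.pyGetD row (fi : Int) "" = row.getD fi "" := by
    rw [PySem.List.pyGetD_eq_getElem row "" (by omega) (by omega),
      List.getD_eq_getElem?_getD, List.getElem?_eq_getElem hfi]
    simp
  have hσhigh := applyRest_fst_getElem_high n row ↑fi (by omega) bi (by omega)
  have hσlen : ((applyRest n row ↑fi).1).length = row.length := length_applyRest n row ↑fi
  -- the B-side row after handling the front bead is applyRest's row with the back cell cleared
  have hacc : ((fun acc (i : Nat) =>
        match restWalk ((acc.length : Int)) acc (i : Int) with
        | some p => acc.set p.toNat (row.getD i "")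
        | none => acc) ((row.set fi ".").set bi ".") fi)
      = (applyRest n row ↑fi).1.set bi "." := by
    rw [applyRest, if_neg (by omega : ¬ ((fi:Int) < 0))]
    simp only [hwc1]
    cases hw : restWalk n row ↑fi with
    | none => simp
    | some p =>
        have hp1 := restWalk_le n row ↑fi p hw
        have hp2 := restWalk_nonneg n row ↑fi p (by omega) hw
        simp only [Int.toNat_natCast, hval]
        rw [List.set_comm _ _ (by omega : bi ≠ p.toNat)]
  show (applyRest n (applyRest n row ↑fi).1 ↑bi).1 = _
  simp only [List.foldl_cons, List.foldl_nil, hacc]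
  -- second bead
  have hwc2 : restWalk ((((applyRest n row ↑fi).1.set bi ".")).length : Int)
      ((applyRest n row ↑fi).1.set bi ".") ↑bi = restWalk n (applyRest n row ↑fi).1 ↑bi := by
    simp only [List.length_set, hσlen, ← hn]
    apply restWalk_congr
    intro k hk
    rw [List.getElem?_set, if_neg (by omega : ¬ (bi = k))]
  have hvb : PySem.List.pyGetD (applyRest n row ↑fi).1 (bi : Int) "" = row.getD bi "" := by
    rw [PySem.List.pyGetD_eq_getElem _ "" (by omega) (by omega),
      List.getD_eq_getElem?_getD, List.getElem?_eq_getElem hb]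
    rw [List.getElem?_eq_getElem (by omega), List.getElem?_eq_getElem hb] at hσhigh
    simp only [Int.toNat_natCast]
    simpa using hσhigh
  rw [applyRest, if_neg (by omega : ¬ ((bi:Int) < 0)), hwc2]
  cases hw2 : restWalk n (applyRest n row ↑fi).1 ↑bi with
  | none => simp
  | some q =>
      simp only [Int.toNat_natCast, hvb]

theorem foldl_fullStep (n : Int) (k : Int) (s : List String × Int × Int) :
    (PySem.List.pyRange 0 k 1).foldl
      (fun st _ =>
        let s1 := tiltMove n st.1 st.2.1
        let s2 := tiltMove n s1.1 st.2.2
        (s2.1, (s1.2, s2.2))) s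
    = (fullStepN n)^[k.toNat] s := by
  have h1 : (fun (st : List String × Int × Int) (_ : Int) =>
        let s1 := tiltMove n st.1 st.2.1
        let s2 := tiltMove n s1.1 st.2.2
        (s2.1, (s1.2, s2.2))) = fun st _ => fullStepN n st := rfl
  rw [h1, List.foldl_const]
  congr 1
  simp [pysem]

theorem tiltRowLeft_eq (row : List String)
    (h : row.contains "R" ∨ row.contains "B") : tiltRowLeft row = settleRow row := by
  by_cases hR : row.contains "R"
  all_goals by_cases hB : row.contains "B"
  · -- both beads present
    obtain ⟨rn, hrn⟩ := Option.isSome_iff_exists.mp ((PySem.List.index?_isSome_iff row "R").mpr (by simpa using hR))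
    obtain ⟨bn, hbn⟩ := Option.isSome_iff_exists.mp ((PySem.List.index?_isSome_iff row "B").mpr (by simpa using hB))
    obtain ⟨hrl, hrv, -⟩ := PySem.List.getElem_of_index?_eq_some hrn
    obtain ⟨hbl, hbv, -⟩ := PySem.List.getElem_of_index?_eq_some hbn
    have hne : rn ≠ bn := by
      intro hc; subst hc; exact absurd (hrv.symm.trans hbv) (by decide)
    have hcast : ((rn : Int) < (bn : Int)) ↔ rn < bn := by omega
    have hcellR : PySem.List.pyGetD row (rn : Int) "" = "R" := by
      rw [PySem.List.pyGetD_eq_getElem row "" (by omega) (by omega)]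
      simpa using hrv
    have hcellB : PySem.List.pyGetD row (bn : Int) "" = "B" := by
      rw [PySem.List.pyGetD_eq_getElem row "" (by omega) (by omega)]
      simpa using hbv
    unfold tiltRowLeft settleRow
    simp only [hR, hB, if_true, hrn, hbn, Option.getD_some]
    have hfm : (([some rn, some bn] : List (Option Nat)).filterMap id) = [rn, bn] := by simp
    rw [hfm, foldl_fullStep]
    by_cases hlt : rn < bn
    · rw [if_pos (hcast.mpr hlt), if_pos (hcast.mpr hlt)]
      have hs : PySem.List.sorted [rn, bn] (fun i => i) false = [rn, bn] :=
        PySem.List.sorted_id_eq_of_perm_of_pairwise _ _ (List.Perm.refl _)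
          (by simp; omega)
      rw [hs]
      have hinv : BInv (↑row.length) row ↑rn ↑bn :=
        ⟨rfl, Or.inr ⟨by omega, by omega, by rw [BeadCell, hcellR]; exact ⟨by decide, by decide⟩⟩,
          Or.inr ⟨by omega, by omega⟩, fun _ _ => by omega⟩
      rw [mainIter _ _ _ _ _ hinv (needed_bound _ _ _) (needed_bound _ _ _)]
      simp only [List.foldl_cons, List.foldl_nil]
      exact settle_pair _ row rn bn rfl hlt hbl
    · have hlt' : bn < rn := by omega
      rw [if_neg (by omega : ¬ ((rn:Int) < (bn:Int))), if_neg (by omega : ¬ ((rn:Int) < (bn:Int)))]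
      have hs : PySem.List.sorted [rn, bn] (fun i => i) false = [bn, rn] :=
        PySem.List.sorted_id_eq_of_perm_of_pairwise _ _ (List.Perm.swap _ _ _)
          (by simp; omega)
      rw [hs]
      have hinv : BInv (↑row.length) row ↑bn ↑rn :=
        ⟨rfl, Or.inr ⟨by omega, by omega, by rw [BeadCell, hcellB]; exact ⟨by decide, by decide⟩⟩,
          Or.inr ⟨by omega, by omega⟩, fun _ _ => by omega⟩
      rw [mainIter _ _ _ _ _ hinv (needed_bound _ _ _) (needed_bound _ _ _)]
      simp only [List.foldl_cons, List.foldl_nil]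
      exact settle_pair _ row bn rn rfl hlt' hrl
  · -- only a red bead
    obtain ⟨rn, hrn⟩ := Option.isSome_iff_exists.mp ((PySem.List.index?_isSome_iff row "R").mpr (by simpa using hR))
    obtain ⟨hrl, hrv, -⟩ := PySem.List.getElem_of_index?_eq_some hrn
    unfold tiltRowLeft settleRow
    simp only [hR, hB, if_true, if_false, Bool.not_eq_true, Bool.false_eq_true, hrn, Option.getD_some]
    have hfm : (([some rn, none] : List (Option Nat)).filterMap id) = [rn] := by simp
    rw [hfm, foldl_fullStep, if_neg (by omega : ¬ ((rn:Int) < -1)), if_neg (by omega : ¬ ((rn:Int) < -1))]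
    have hs : PySem.List.sorted [rn] (fun i => i) false = [rn] :=
      PySem.List.sorted_id_eq_of_perm_of_pairwise _ _ (List.Perm.refl _) (by simp)
    rw [hs]
    have hinv : BInv (↑row.length) row (-1) ↑rn :=
      ⟨rfl, Or.inl rfl, Or.inr ⟨by omega, by omega⟩, fun hf _ => absurd rfl hf⟩
    rw [mainIter _ _ _ _ _ hinv (needed_bound _ _ _) (needed_bound _ _ _)]
    simp only [List.foldl_cons, List.foldl_nil]
    exact settle_single _ row rn rfl hrl
  · -- only a blue bead
    obtain ⟨bn, hbn⟩ := Option.isSome_iff_exists.mp ((PySem.List.index?_isSome_iff row "B").mpr (by simpa using hB))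
    obtain ⟨hbl, hbv, -⟩ := PySem.List.getElem_of_index?_eq_some hbn
    unfold tiltRowLeft settleRow
    simp only [hR, hB, if_true, if_false, Bool.not_eq_true, Bool.false_eq_true, hbn, Option.getD_some]
    have hfm : (([none, some bn] : List (Option Nat)).filterMap id) = [bn] := by simp
    rw [hfm, foldl_fullStep, if_pos (by omega : ((-1 : Int) < (bn:Int))), if_pos (by omega : ((-1 : Int) < (bn:Int)))]
    have hs : PySem.List.sorted [bn] (fun i => i) false = [bn] :=
      PySem.List.sorted_id_eq_of_perm_of_pairwise _ _ (List.Perm.refl _) (by simp)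
    rw [hs]
    have hinv : BInv (↑row.length) row (-1) ↑bn :=
      ⟨rfl, Or.inl rfl, Or.inr ⟨by omega, by omega⟩, fun hf _ => absurd rfl hf⟩
    rw [mainIter _ _ _ _ _ hinv (needed_bound _ _ _) (needed_bound _ _ _)]
    simp only [List.foldl_cons, List.foldl_nil]
    exact settle_single _ row bn rfl hbl
  · exact absurd h (by
      simp only [List.contains_iff_mem] at hR hB ⊢
      rintro (hc | hc) <;> simp_all)

-- ===== VERDICT (by name: the statement is the Claim_ definition above) =====
theorem tilt_left_spec : Claim_equal_tilt_left := by
  intro board _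
  show tilt_left board = tilt_left_alt board
  unfold tilt_left tilt_left_alt
  have hfun : (fun (acc : List (List String)) (p : Int × List String) =>
        if p.1 = 0 ∨ p.1 = (board.length : Int) - 1 then
          acc ++ [List.replicate (board.headD []).length "#"]
        else if ¬ p.2.contains "R" ∧ ¬ p.2.contains "B" then acc ++ [p.2]
        else acc ++ [tiltRowLeft p.2])
      = fun (acc : List (List String)) (p : Int × List String) =>
          acc ++ [if p.1 = 0 ∨ p.1 = (board.length : Int) - 1 then
              List.replicate (board.headD []).length "#"
            else if p.2.contains "R" ∨ p.2.contains "B" then settleRow p.2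
            else p.2] := by
    funext acc p
    by_cases h1 : p.1 = 0 ∨ p.1 = (board.length : Int) - 1
    · simp [h1]
    · by_cases hc : p.2.contains "R" ∨ p.2.contains "B"
      · have hc' : ¬ (¬ p.2.contains "R" ∧ ¬ p.2.contains "B") := by tauto
        simp only [h1, hc, hc', if_true, if_false]
        rw [tiltRowLeft_eq p.2 hc]
      · have hc' : ¬ p.2.contains "R" ∧ ¬ p.2.contains "B" := by tauto
        simp only [List.contains_iff_mem] at hc'
        simp [h1, hc'.1, hc'.2]
  rw [hfun, PySem.List.foldl_append_singleton_eq_map, List.nil_append]
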